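-- pv_equiv track=rewrite | github.com/MozartofCode/Poker-Smart-Contract | game.py | get_high_card
-- ===== SOURCE A (Python) =====
-- def get_high_card(cards):
--     ranks = []
--
--     for card in cards:
--         rank = card.split(" of ")[0]
--         ranks.append(rank)
--
--     if "Ace" in ranks:
--         return "14"
--
--     elif "King" in ranks:
--         return "13"
--
--     elif "Queen" in ranks:
--         return "12"
--
--     elif "Jack" in ranks:
--         return "11"
--
--     elif "10" in ranks:
--         return "10"
--
--     elif "9" in ranks:
--         return "9"
--
--     elif "8" in ranks:
--         return "8"
--
--     elif "7" in ranks: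
--         return "7"
--
--     elif "6" in ranks:
--         return "6"
--
--     elif "5" in ranks:
--         return "5"
--
--     elif "4" in ranks:
--         return "4"
--
--     elif "3" in ranks:
--         return "3"
--
--     elif "2" in ranks:
--         return "2"
-- ===== SOURCE B (Python) =====
-- RANK_VALUES = {"Ace": 14, "King": 13, "Queen": 12, "Jack": 11,
--                "10": 10, "9": 9, "8": 8, "7": 7, "6": 6,
--                "5": 5, "4": 4, "3": 3, "2": 2}
--
--
-- def get_high_card(cards):
--     best = None
--     for card in cards:
--         v = RANK_VALUES.get(card.split(" of ")[0])
--         if v is not None and (best is None or v > best):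
--             best = v
--     if best is not None:
--         return str(best)
-- ===== Notes on version B (the rewrite author's own statement) =====
-- stated objective: simpler
-- what changed: Replaced the 13-branch membership cascade (each branch rescanning the whole ranks list) by a single pass that keeps a running maximum of a rank-to-value table lookup and stringifies it at the end.
import Mathlib
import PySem

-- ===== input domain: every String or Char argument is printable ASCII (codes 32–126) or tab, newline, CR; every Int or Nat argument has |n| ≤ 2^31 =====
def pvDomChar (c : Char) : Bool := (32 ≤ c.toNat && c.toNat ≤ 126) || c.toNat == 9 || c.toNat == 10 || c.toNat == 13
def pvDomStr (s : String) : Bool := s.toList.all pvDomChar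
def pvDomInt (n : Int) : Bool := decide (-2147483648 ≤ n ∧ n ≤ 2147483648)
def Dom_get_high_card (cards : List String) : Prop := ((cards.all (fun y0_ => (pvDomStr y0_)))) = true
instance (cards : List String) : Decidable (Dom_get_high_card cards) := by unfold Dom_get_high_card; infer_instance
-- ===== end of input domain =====

-- B replaces A's 13-branch membership cascade by one pass keeping a running maximum of a
-- rank-to-value table lookup (objective: simpler).

-- ===== PORT A =====
-- card.split(" of ")[0]: split? with a nonempty separator is always some, and the resulting
-- list is nonempty, so [0] never raises; getD/headD are exact here.
def get_high_card (cards : List String) : Option String :=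
  let ranks := cards.foldl (fun acc card => acc ++ [((PySem.Str.split? card " of ").getD []).headD ""]) []
  if ranks.contains "Ace" then some "14"
  else if ranks.contains "King" then some "13"
  else if ranks.contains "Queen" then some "12"
  else if ranks.contains "Jack" then some "11"
  else if ranks.contains "10" then some "10"
  else if ranks.contains "9" then some "9"
  else if ranks.contains "8" then some "8"
  else if ranks.contains "7" then some "7"
  else if ranks.contains "6" then some "6"
  else if ranks.contains "5" then some "5"
  else if ranks.contains "4" then some "4"
  else if ranks.contains "3" then some "3"
  else if ranks.contains "2" then some "2"
  else none

-- ===== PORT B =====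
def rankValues : PySem.Dict String Int :=
  PySem.Dict.ofList [("Ace", 14), ("King", 13), ("Queen", 12), ("Jack", 11),
                     ("10", 10), ("9", 9), ("8", 8), ("7", 7), ("6", 6),
                     ("5", 5), ("4", 4), ("3", 3), ("2", 2)]

def get_high_card_alt (cards : List String) : Option String :=
  let best := cards.foldl (fun best card =>
    match rankValues.get? (((PySem.Str.split? card " of ").getD []).headD "") with
    | none => best
    | some v =>
      match best with
      | none => some v
      | some b => if v > b then some v else best) none
  best.map PySem.Int.toStr

-- ===== PRECONDITION & SPEC =====
def Spec_get_high_card (cards : List String) (out : Option String) : Prop := out = get_high_card_alt cards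
instance (cards : List String) (out : Option String) : Decidable (Spec_get_high_card cards out) := by unfold Spec_get_high_card; infer_instance

-- ===== CLAIM (what is proved, stated in full; the proofs are below) =====
def Claim_equal_get_high_card : Prop := ∀ (cards : List String), Dom_get_high_card cards → Spec_get_high_card cards (get_high_card cards)

-- ===== LEMMAS AND PROOFS =====

-- the rank string of one card, shared by both ports
def rk (card : String) : String := ((PySem.Str.split? card " of ").getD []).headD ""

def val (r : String) : Option Int := rankValues.get? r

-- the sequence of recognized rank values of a hand
def vals (ranks : List String) : List Int := ranks.filterMap val

-- B's combining step on an already looked-up value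
def maxo (best : Option Int) (v : Int) : Option Int :=
  match best with
  | none => some v
  | some b => if v > b then some v else best

-- A's cascade, as a function of the rank strings
def cascade (ranks : List String) : Option String :=
  if ranks.contains "Ace" then some "14"
  else if ranks.contains "King" then some "13"
  else if ranks.contains "Queen" then some "12"
  else if ranks.contains "Jack" then some "11"
  else if ranks.contains "10" then some "10"
  else if ranks.contains "9" then some "9"
  else if ranks.contains "8" then some "8"
  else if ranks.contains "7" then some "7"
  else if ranks.contains "6" then some "6"
  else if ranks.contains "5" then some "5"
  else if ranks.contains "4" then some "4"
  else if ranks.contains "3" then some "3"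
  else if ranks.contains "2" then some "2"
  else none

lemma A_eq (cards : List String) : get_high_card cards = cascade (cards.map rk) := by
  unfold get_high_card cascade rk
  rw [PySem.List.foldl_append_singleton_eq_map, List.nil_append]

set_option maxHeartbeats 1000000 in
set_option maxRecDepth 8192 in
lemma val_cases (r : String) (v : Int) (h : val r = some v) :
    (r = "Ace" ∧ v = 14) ∨ (r = "King" ∧ v = 13) ∨ (r = "Queen" ∧ v = 12) ∨
    (r = "Jack" ∧ v = 11) ∨ (r = "10" ∧ v = 10) ∨ (r = "9" ∧ v = 9) ∨
    (r = "8" ∧ v = 8) ∨ (r = "7" ∧ v = 7) ∨ (r = "6" ∧ v = 6) ∨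
    (r = "5" ∧ v = 5) ∨ (r = "4" ∧ v = 4) ∨ (r = "3" ∧ v = 3) ∨ (r = "2" ∧ v = 2) := by
  by_cases e1 : r = "Ace"
  · exact Or.inl ⟨e1, by rw [e1, show val "Ace" = some 14 from rfl] at h; exact (Option.some_inj.mp h).symm⟩
  by_cases e2 : r = "King"
  · exact Or.inr (Or.inl ⟨e2, by rw [e2, show val "King" = some 13 from rfl] at h; exact (Option.some_inj.mp h).symm⟩)
  by_cases e3 : r = "Queen"
  · exact Or.inr (Or.inr (Or.inl ⟨e3, by rw [e3, show val "Queen" = some 12 from rfl] at h; exact (Option.some_inj.mp h).symm⟩))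
  by_cases e4 : r = "Jack"
  · exact Or.inr (Or.inr (Or.inr (Or.inl ⟨e4, by rw [e4, show val "Jack" = some 11 from rfl] at h; exact (Option.some_inj.mp h).symm⟩)))
  by_cases e5 : r = "10"
  · exact Or.inr (Or.inr (Or.inr (Or.inr (Or.inl ⟨e5, by rw [e5, show val "10" = some 10 from rfl] at h; exact (Option.some_inj.mp h).symm⟩))))
  by_cases e6 : r = "9"
  · exact Or.inr (Or.inr (Or.inr (Or.inr (Or.inr (Or.inl ⟨e6, by rw [e6, show val "9" = some 9 from rfl] at h; exact (Option.some_inj.mp h).symm⟩)))))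
  by_cases e7 : r = "8"
  · exact Or.inr (Or.inr (Or.inr (Or.inr (Or.inr (Or.inr (Or.inl ⟨e7, by rw [e7, show val "8" = some 8 from rfl] at h; exact (Option.some_inj.mp h).symm⟩))))))
  by_cases e8 : r = "7"
  · exact Or.inr (Or.inr (Or.inr (Or.inr (Or.inr (Or.inr (Or.inr (Or.inl ⟨e8, by rw [e8, show val "7" = some 7 from rfl] at h; exact (Option.some_inj.mp h).symm⟩)))))))
  by_cases e9 : r = "6"
  · exact Or.inr (Or.inr (Or.inr (Or.inr (Or.inr (Or.inr (Or.inr (Or.inr (Or.inl ⟨e9, by rw [e9, show val "6" = some 6 from rfl] at h; exact (Option.some_inj.mp h).symm⟩))))))))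
  by_cases e10 : r = "5"
  · exact Or.inr (Or.inr (Or.inr (Or.inr (Or.inr (Or.inr (Or.inr (Or.inr (Or.inr (Or.inl ⟨e10, by rw [e10, show val "5" = some 5 from rfl] at h; exact (Option.some_inj.mp h).symm⟩)))))))))
  by_cases e11 : r = "4"
  · exact Or.inr (Or.inr (Or.inr (Or.inr (Or.inr (Or.inr (Or.inr (Or.inr (Or.inr (Or.inr (Or.inl ⟨e11, by rw [e11, show val "4" = some 4 from rfl] at h; exact (Option.some_inj.mp h).symm⟩))))))))))
  by_cases e12 : r = "3"
  · exact Or.inr (Or.inr (Or.inr (Or.inr (Or.inr (Or.inr (Or.inr (Or.inr (Or.inr (Or.inr (Or.inr (Or.inl ⟨e12, by rw [e12, show val "3" = some 3 from rfl] at h; exact (Option.some_inj.mp h).symm⟩)))))))))))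
  by_cases e13 : r = "2"
  · exact Or.inr (Or.inr (Or.inr (Or.inr (Or.inr (Or.inr (Or.inr (Or.inr (Or.inr (Or.inr (Or.inr (Or.inr (⟨e13, by rw [e13, show val "2" = some 2 from rfl] at h; exact (Option.some_inj.mp h).symm⟩))))))))))))
  · exfalso
    have hrv : rankValues = PySem.Dict.mk [("Ace", 14), ("King", 13), ("Queen", 12), ("Jack", 11), ("10", 10), ("9", 9), ("8", 8), ("7", 7), ("6", 6), ("5", 5), ("4", 4), ("3", 3), ("2", 2)] := by rfl
    rw [val, hrv] at h
    simp only [PySem.Dict.get?_mk_cons] at h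
    rw [if_neg (fun hb => e1 (eq_of_beq hb).symm)] at h
    rw [if_neg (fun hb => e2 (eq_of_beq hb).symm)] at h
    rw [if_neg (fun hb => e3 (eq_of_beq hb).symm)] at h
    rw [if_neg (fun hb => e4 (eq_of_beq hb).symm)] at h
    rw [if_neg (fun hb => e5 (eq_of_beq hb).symm)] at h
    rw [if_neg (fun hb => e6 (eq_of_beq hb).symm)] at h
    rw [if_neg (fun hb => e7 (eq_of_beq hb).symm)] at h
    rw [if_neg (fun hb => e8 (eq_of_beq hb).symm)] at h
    rw [if_neg (fun hb => e9 (eq_of_beq hb).symm)] at h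
    rw [if_neg (fun hb => e10 (eq_of_beq hb).symm)] at h
    rw [if_neg (fun hb => e11 (eq_of_beq hb).symm)] at h
    rw [if_neg (fun hb => e12 (eq_of_beq hb).symm)] at h
    rw [if_neg (fun hb => e13 (eq_of_beq hb).symm)] at h
    simp [PySem.Dict.get?] at h

lemma mem_vals_iff (ranks : List String) (r : String) (v : Int)
    (hv : val r = some v) (hinj : ∀ r', val r' = some v → r' = r) :
    v ∈ vals ranks ↔ r ∈ ranks := by
  simp only [vals, List.mem_filterMap]
  constructor
  · rintro ⟨r', hr', hval⟩
    rwa [hinj r' hval] at hr'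
  · intro hr
    exact ⟨r, hr, hv⟩

lemma vals_bound (ranks : List String) (v : Int) (h : v ∈ vals ranks) : 2 ≤ v ∧ v ≤ 14 := by
  simp only [vals, List.mem_filterMap] at h
  obtain ⟨r, -, hval⟩ := h
  rcases val_cases r v hval with ⟨-,rfl⟩|⟨-,rfl⟩|⟨-,rfl⟩|⟨-,rfl⟩|⟨-,rfl⟩|⟨-,rfl⟩|⟨-,rfl⟩|⟨-,rfl⟩|⟨-,rfl⟩|⟨-,rfl⟩|⟨-,rfl⟩|⟨-,rfl⟩|⟨-,rfl⟩ <;> omega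

lemma inj14 : ∀ r, val r = some 14 → r = "Ace" := by
  intro r hr
  rcases val_cases r 14 hr with ⟨h,hv⟩|⟨h,hv⟩|⟨h,hv⟩|⟨h,hv⟩|⟨h,hv⟩|⟨h,hv⟩|⟨h,hv⟩|⟨h,hv⟩|⟨h,hv⟩|⟨h,hv⟩|⟨h,hv⟩|⟨h,hv⟩|⟨h,hv⟩ <;> first | exact h | omega

lemma inj13 : ∀ r, val r = some 13 → r = "King" := by
  intro r hr
  rcases val_cases r 13 hr with ⟨h,hv⟩|⟨h,hv⟩|⟨h,hv⟩|⟨h,hv⟩|⟨h,hv⟩|⟨h,hv⟩|⟨h,hv⟩|⟨h,hv⟩|⟨h,hv⟩|⟨h,hv⟩|⟨h,hv⟩|⟨h,hv⟩|⟨h,hv⟩ <;> first | exact h | omega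

lemma inj12 : ∀ r, val r = some 12 → r = "Queen" := by
  intro r hr
  rcases val_cases r 12 hr with ⟨h,hv⟩|⟨h,hv⟩|⟨h,hv⟩|⟨h,hv⟩|⟨h,hv⟩|⟨h,hv⟩|⟨h,hv⟩|⟨h,hv⟩|⟨h,hv⟩|⟨h,hv⟩|⟨h,hv⟩|⟨h,hv⟩|⟨h,hv⟩ <;> first | exact h | omega

lemma inj11 : ∀ r, val r = some 11 → r = "Jack" := by
  intro r hr
  rcases val_cases r 11 hr with ⟨h,hv⟩|⟨h,hv⟩|⟨h,hv⟩|⟨h,hv⟩|⟨h,hv⟩|⟨h,hv⟩|⟨h,hv⟩|⟨h,hv⟩|⟨h,hv⟩|⟨h,hv⟩|⟨h,hv⟩|⟨h,hv⟩|⟨h,hv⟩ <;> first | exact h | omega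

lemma inj10 : ∀ r, val r = some 10 → r = "10" := by
  intro r hr
  rcases val_cases r 10 hr with ⟨h,hv⟩|⟨h,hv⟩|⟨h,hv⟩|⟨h,hv⟩|⟨h,hv⟩|⟨h,hv⟩|⟨h,hv⟩|⟨h,hv⟩|⟨h,hv⟩|⟨h,hv⟩|⟨h,hv⟩|⟨h,hv⟩|⟨h,hv⟩ <;> first | exact h | omega

lemma inj9 : ∀ r, val r = some 9 → r = "9" := by
  intro r hr
  rcases val_cases r 9 hr with ⟨h,hv⟩|⟨h,hv⟩|⟨h,hv⟩|⟨h,hv⟩|⟨h,hv⟩|⟨h,hv⟩|⟨h,hv⟩|⟨h,hv⟩|⟨h,hv⟩|⟨h,hv⟩|⟨h,hv⟩|⟨h,hv⟩|⟨h,hv⟩ <;> first | exact h | omega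

lemma inj8 : ∀ r, val r = some 8 → r = "8" := by
  intro r hr
  rcases val_cases r 8 hr with ⟨h,hv⟩|⟨h,hv⟩|⟨h,hv⟩|⟨h,hv⟩|⟨h,hv⟩|⟨h,hv⟩|⟨h,hv⟩|⟨h,hv⟩|⟨h,hv⟩|⟨h,hv⟩|⟨h,hv⟩|⟨h,hv⟩|⟨h,hv⟩ <;> first | exact h | omega

lemma inj7 : ∀ r, val r = some 7 → r = "7" := by
  intro r hr
  rcases val_cases r 7 hr with ⟨h,hv⟩|⟨h,hv⟩|⟨h,hv⟩|⟨h,hv⟩|⟨h,hv⟩|⟨h,hv⟩|⟨h,hv⟩|⟨h,hv⟩|⟨h,hv⟩|⟨h,hv⟩|⟨h,hv⟩|⟨h,hv⟩|⟨h,hv⟩ <;> first | exact h | omega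

lemma inj6 : ∀ r, val r = some 6 → r = "6" := by
  intro r hr
  rcases val_cases r 6 hr with ⟨h,hv⟩|⟨h,hv⟩|⟨h,hv⟩|⟨h,hv⟩|⟨h,hv⟩|⟨h,hv⟩|⟨h,hv⟩|⟨h,hv⟩|⟨h,hv⟩|⟨h,hv⟩|⟨h,hv⟩|⟨h,hv⟩|⟨h,hv⟩ <;> first | exact h | omega

lemma inj5 : ∀ r, val r = some 5 → r = "5" := by
  intro r hr
  rcases val_cases r 5 hr with ⟨h,hv⟩|⟨h,hv⟩|⟨h,hv⟩|⟨h,hv⟩|⟨h,hv⟩|⟨h,hv⟩|⟨h,hv⟩|⟨h,hv⟩|⟨h,hv⟩|⟨h,hv⟩|⟨h,hv⟩|⟨h,hv⟩|⟨h,hv⟩ <;> first | exact h | omega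

lemma inj4 : ∀ r, val r = some 4 → r = "4" := by
  intro r hr
  rcases val_cases r 4 hr with ⟨h,hv⟩|⟨h,hv⟩|⟨h,hv⟩|⟨h,hv⟩|⟨h,hv⟩|⟨h,hv⟩|⟨h,hv⟩|⟨h,hv⟩|⟨h,hv⟩|⟨h,hv⟩|⟨h,hv⟩|⟨h,hv⟩|⟨h,hv⟩ <;> first | exact h | omega

lemma inj3 : ∀ r, val r = some 3 → r = "3" := by
  intro r hr
  rcases val_cases r 3 hr with ⟨h,hv⟩|⟨h,hv⟩|⟨h,hv⟩|⟨h,hv⟩|⟨h,hv⟩|⟨h,hv⟩|⟨h,hv⟩|⟨h,hv⟩|⟨h,hv⟩|⟨h,hv⟩|⟨h,hv⟩|⟨h,hv⟩|⟨h,hv⟩ <;> first | exact h | omega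

lemma inj2 : ∀ r, val r = some 2 → r = "2" := by
  intro r hr
  rcases val_cases r 2 hr with ⟨h,hv⟩|⟨h,hv⟩|⟨h,hv⟩|⟨h,hv⟩|⟨h,hv⟩|⟨h,hv⟩|⟨h,hv⟩|⟨h,hv⟩|⟨h,hv⟩|⟨h,hv⟩|⟨h,hv⟩|⟨h,hv⟩|⟨h,hv⟩ <;> first | exact h | omega

lemma foldl_maxo_some (l : List Int) (b : Int) :
    l.foldl maxo (some b) = some (l.foldl max b) := by
  induction l generalizing b with
  | nil => rfl
  | cons v t ih =>
    simp only [List.foldl_cons, maxo]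
    rw [show (if v > b then some v else some b) = some (max b v) by
      rcases le_or_gt v b with h | h
      · simp [not_lt.mpr h, max_eq_left h]
      · simp [h, max_eq_right h.le]]
    exact ih (max b v)

lemma foldl_maxo_none (l : List Int) : l.foldl maxo none = l.max? := by
  cases l with
  | nil => rfl
  | cons a t =>
    show t.foldl maxo (maxo none a) = _
    rw [show maxo none a = some a from rfl, foldl_maxo_some]
    simp [List.max?]

lemma max?_eq_some_of_mem_of_le (l : List Int) (v : Int) (hv : v ∈ l)
    (hle : ∀ w ∈ l, w ≤ v) : l.max? = some v :=
  List.max?_eq_some_iff.mpr ⟨hv, hle⟩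

lemma fold_eq (cards : List String) (acc : Option Int) :
    cards.foldl (fun best card =>
      match rankValues.get? (((PySem.Str.split? card " of ").getD []).headD "") with
      | none => best
      | some v =>
        match best with
        | none => some v
        | some b => if v > b then some v else best) acc
      = (vals (cards.map rk)).foldl maxo acc := by
  induction cards generalizing acc with
  | nil => rfl
  | cons c t ih =>
    simp only [List.foldl_cons, List.map_cons]
    cases h : val (rk c) with
    | none =>
      rw [show (match rankValues.get? (((PySem.Str.split? c " of ").getD []).headD "") with
        | none => acc
        | some v => match acc with
          | none => some v
          | some b => if v > b then some v else acc) = acc from by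
          rw [show rankValues.get? (((PySem.Str.split? c " of ").getD []).headD "") = val (rk c) from rfl, h]]
      rw [ih]
      simp only [vals, List.filterMap_cons, h]
    | some v =>
      rw [show (match rankValues.get? (((PySem.Str.split? c " of ").getD []).headD "") with
        | none => acc
        | some v => match acc with
          | none => some v
          | some b => if v > b then some v else acc) = maxo acc v from by
          rw [show rankValues.get? (((PySem.Str.split? c " of ").getD []).headD "") = val (rk c) from rfl, h]; rfl]
      rw [ih]
      simp only [vals, List.filterMap_cons, h]
      rfl

lemma B_eq (cards : List String) :
    get_high_card_alt cards = ((vals (cards.map rk)).max?).map PySem.Int.toStr := by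
  unfold get_high_card_alt
  rw [fold_eq, foldl_maxo_none]

lemma cascade_eq (ranks : List String) :
    cascade ranks = ((vals ranks).max?).map PySem.Int.toStr := by
  have hbnd := vals_bound ranks
  by_cases m14 : (14 : Int) ∈ vals ranks
  · have hmax : (vals ranks).max? = some 14 := by
      apply max?_eq_some_of_mem_of_le _ _ m14
      intro w hw
      exact (hbnd w hw).2
    have hcon : ranks.contains "Ace" = true := by
      simpa using (mem_vals_iff ranks "Ace" 14 rfl (inj14)).mp m14
    rw [cascade, hmax]
    rw [if_pos hcon]
    rfl
  have hcn14 : ranks.contains "Ace" = false := by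
    by_contra hc
    exact m14 ((mem_vals_iff ranks "Ace" 14 rfl (inj14)).mpr (by simpa using Bool.of_not_eq_false hc))
  by_cases m13 : (13 : Int) ∈ vals ranks
  · have hmax : (vals ranks).max? = some 13 := by
      apply max?_eq_some_of_mem_of_le _ _ m13
      intro w hw
      have hb := hbnd w hw
      have n14 : w ≠ 14 := fun e => m14 (e ▸ hw)
      omega
    have hcon : ranks.contains "King" = true := by
      simpa using (mem_vals_iff ranks "King" 13 rfl (inj13)).mp m13
    rw [cascade, hmax]
    rw [if_neg (by simp only [hcn14]; exact Bool.false_ne_true), if_pos hcon]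
    rfl
  have hcn13 : ranks.contains "King" = false := by
    by_contra hc
    exact m13 ((mem_vals_iff ranks "King" 13 rfl (inj13)).mpr (by simpa using Bool.of_not_eq_false hc))
  by_cases m12 : (12 : Int) ∈ vals ranks
  · have hmax : (vals ranks).max? = some 12 := by
      apply max?_eq_some_of_mem_of_le _ _ m12
      intro w hw
      have hb := hbnd w hw
      have n14 : w ≠ 14 := fun e => m14 (e ▸ hw)
      have n13 : w ≠ 13 := fun e => m13 (e ▸ hw)
      omega
    have hcon : ranks.contains "Queen" = true := by
      simpa using (mem_vals_iff ranks "Queen" 12 rfl (inj12)).mp m12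
    rw [cascade, hmax]
    rw [if_neg (by simp only [hcn14]; exact Bool.false_ne_true), if_neg (by simp only [hcn13]; exact Bool.false_ne_true), if_pos hcon]
    rfl
  have hcn12 : ranks.contains "Queen" = false := by
    by_contra hc
    exact m12 ((mem_vals_iff ranks "Queen" 12 rfl (inj12)).mpr (by simpa using Bool.of_not_eq_false hc))
  by_cases m11 : (11 : Int) ∈ vals ranks
  · have hmax : (vals ranks).max? = some 11 := by
      apply max?_eq_some_of_mem_of_le _ _ m11
      intro w hw
      have hb := hbnd w hw
      have n14 : w ≠ 14 := fun e => m14 (e ▸ hw)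
      have n13 : w ≠ 13 := fun e => m13 (e ▸ hw)
      have n12 : w ≠ 12 := fun e => m12 (e ▸ hw)
      omega
    have hcon : ranks.contains "Jack" = true := by
      simpa using (mem_vals_iff ranks "Jack" 11 rfl (inj11)).mp m11
    rw [cascade, hmax]
    rw [if_neg (by simp only [hcn14]; exact Bool.false_ne_true), if_neg (by simp only [hcn13]; exact Bool.false_ne_true), if_neg (by simp only [hcn12]; exact Bool.false_ne_true), if_pos hcon]
    rfl
  have hcn11 : ranks.contains "Jack" = false := by
    by_contra hc
    exact m11 ((mem_vals_iff ranks "Jack" 11 rfl (inj11)).mpr (by simpa using Bool.of_not_eq_false hc))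
  by_cases m10 : (10 : Int) ∈ vals ranks
  · have hmax : (vals ranks).max? = some 10 := by
      apply max?_eq_some_of_mem_of_le _ _ m10
      intro w hw
      have hb := hbnd w hw
      have n14 : w ≠ 14 := fun e => m14 (e ▸ hw)
      have n13 : w ≠ 13 := fun e => m13 (e ▸ hw)
      have n12 : w ≠ 12 := fun e => m12 (e ▸ hw)
      have n11 : w ≠ 11 := fun e => m11 (e ▸ hw)
      omega
    have hcon : ranks.contains "10" = true := by
      simpa using (mem_vals_iff ranks "10" 10 rfl (inj10)).mp m10
    rw [cascade, hmax]
    rw [if_neg (by simp only [hcn14]; exact Bool.false_ne_true), if_neg (by simp only [hcn13]; exact Bool.false_ne_true), if_neg (by simp only [hcn12]; exact Bool.false_ne_true), if_neg (by simp only [hcn11]; exact Bool.false_ne_true), if_pos hcon]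
    rfl
  have hcn10 : ranks.contains "10" = false := by
    by_contra hc
    exact m10 ((mem_vals_iff ranks "10" 10 rfl (inj10)).mpr (by simpa using Bool.of_not_eq_false hc))
  by_cases m9 : (9 : Int) ∈ vals ranks
  · have hmax : (vals ranks).max? = some 9 := by
      apply max?_eq_some_of_mem_of_le _ _ m9
      intro w hw
      have hb := hbnd w hw
      have n14 : w ≠ 14 := fun e => m14 (e ▸ hw)
      have n13 : w ≠ 13 := fun e => m13 (e ▸ hw)
      have n12 : w ≠ 12 := fun e => m12 (e ▸ hw)
      have n11 : w ≠ 11 := fun e => m11 (e ▸ hw)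
      have n10 : w ≠ 10 := fun e => m10 (e ▸ hw)
      omega
    have hcon : ranks.contains "9" = true := by
      simpa using (mem_vals_iff ranks "9" 9 rfl (inj9)).mp m9
    rw [cascade, hmax]
    rw [if_neg (by simp only [hcn14]; exact Bool.false_ne_true), if_neg (by simp only [hcn13]; exact Bool.false_ne_true), if_neg (by simp only [hcn12]; exact Bool.false_ne_true), if_neg (by simp only [hcn11]; exact Bool.false_ne_true), if_neg (by simp only [hcn10]; exact Bool.false_ne_true), if_pos hcon]
    rfl
  have hcn9 : ranks.contains "9" = false := by
    by_contra hc
    exact m9 ((mem_vals_iff ranks "9" 9 rfl (inj9)).mpr (by simpa using Bool.of_not_eq_false hc))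
  by_cases m8 : (8 : Int) ∈ vals ranks
  · have hmax : (vals ranks).max? = some 8 := by
      apply max?_eq_some_of_mem_of_le _ _ m8
      intro w hw
      have hb := hbnd w hw
      have n14 : w ≠ 14 := fun e => m14 (e ▸ hw)
      have n13 : w ≠ 13 := fun e => m13 (e ▸ hw)
      have n12 : w ≠ 12 := fun e => m12 (e ▸ hw)
      have n11 : w ≠ 11 := fun e => m11 (e ▸ hw)
      have n10 : w ≠ 10 := fun e => m10 (e ▸ hw)
      have n9 : w ≠ 9 := fun e => m9 (e ▸ hw)
      omega
    have hcon : ranks.contains "8" = true := by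
      simpa using (mem_vals_iff ranks "8" 8 rfl (inj8)).mp m8
    rw [cascade, hmax]
    rw [if_neg (by simp only [hcn14]; exact Bool.false_ne_true), if_neg (by simp only [hcn13]; exact Bool.false_ne_true), if_neg (by simp only [hcn12]; exact Bool.false_ne_true), if_neg (by simp only [hcn11]; exact Bool.false_ne_true), if_neg (by simp only [hcn10]; exact Bool.false_ne_true), if_neg (by simp only [hcn9]; exact Bool.false_ne_true), if_pos hcon]
    rfl
  have hcn8 : ranks.contains "8" = false := by
    by_contra hc
    exact m8 ((mem_vals_iff ranks "8" 8 rfl (inj8)).mpr (by simpa using Bool.of_not_eq_false hc))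
  by_cases m7 : (7 : Int) ∈ vals ranks
  · have hmax : (vals ranks).max? = some 7 := by
      apply max?_eq_some_of_mem_of_le _ _ m7
      intro w hw
      have hb := hbnd w hw
      have n14 : w ≠ 14 := fun e => m14 (e ▸ hw)
      have n13 : w ≠ 13 := fun e => m13 (e ▸ hw)
      have n12 : w ≠ 12 := fun e => m12 (e ▸ hw)
      have n11 : w ≠ 11 := fun e => m11 (e ▸ hw)
      have n10 : w ≠ 10 := fun e => m10 (e ▸ hw)
      have n9 : w ≠ 9 := fun e => m9 (e ▸ hw)
      have n8 : w ≠ 8 := fun e => m8 (e ▸ hw)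
      omega
    have hcon : ranks.contains "7" = true := by
      simpa using (mem_vals_iff ranks "7" 7 rfl (inj7)).mp m7
    rw [cascade, hmax]
    rw [if_neg (by simp only [hcn14]; exact Bool.false_ne_true), if_neg (by simp only [hcn13]; exact Bool.false_ne_true), if_neg (by simp only [hcn12]; exact Bool.false_ne_true), if_neg (by simp only [hcn11]; exact Bool.false_ne_true), if_neg (by simp only [hcn10]; exact Bool.false_ne_true), if_neg (by simp only [hcn9]; exact Bool.false_ne_true), if_neg (by simp only [hcn8]; exact Bool.false_ne_true), if_pos hcon]
    rfl
  have hcn7 : ranks.contains "7" = false := by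
    by_contra hc
    exact m7 ((mem_vals_iff ranks "7" 7 rfl (inj7)).mpr (by simpa using Bool.of_not_eq_false hc))
  by_cases m6 : (6 : Int) ∈ vals ranks
  · have hmax : (vals ranks).max? = some 6 := by
      apply max?_eq_some_of_mem_of_le _ _ m6
      intro w hw
      have hb := hbnd w hw
      have n14 : w ≠ 14 := fun e => m14 (e ▸ hw)
      have n13 : w ≠ 13 := fun e => m13 (e ▸ hw)
      have n12 : w ≠ 12 := fun e => m12 (e ▸ hw)
      have n11 : w ≠ 11 := fun e => m11 (e ▸ hw)
      have n10 : w ≠ 10 := fun e => m10 (e ▸ hw)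
      have n9 : w ≠ 9 := fun e => m9 (e ▸ hw)
      have n8 : w ≠ 8 := fun e => m8 (e ▸ hw)
      have n7 : w ≠ 7 := fun e => m7 (e ▸ hw)
      omega
    have hcon : ranks.contains "6" = true := by
      simpa using (mem_vals_iff ranks "6" 6 rfl (inj6)).mp m6
    rw [cascade, hmax]
    rw [if_neg (by simp only [hcn14]; exact Bool.false_ne_true), if_neg (by simp only [hcn13]; exact Bool.false_ne_true), if_neg (by simp only [hcn12]; exact Bool.false_ne_true), if_neg (by simp only [hcn11]; exact Bool.false_ne_true), if_neg (by simp only [hcn10]; exact Bool.false_ne_true), if_neg (by simp only [hcn9]; exact Bool.false_ne_true), if_neg (by simp only [hcn8]; exact Bool.false_ne_true), if_neg (by simp only [hcn7]; exact Bool.false_ne_true), if_pos hcon]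
    rfl
  have hcn6 : ranks.contains "6" = false := by
    by_contra hc
    exact m6 ((mem_vals_iff ranks "6" 6 rfl (inj6)).mpr (by simpa using Bool.of_not_eq_false hc))
  by_cases m5 : (5 : Int) ∈ vals ranks
  · have hmax : (vals ranks).max? = some 5 := by
      apply max?_eq_some_of_mem_of_le _ _ m5
      intro w hw
      have hb := hbnd w hw
      have n14 : w ≠ 14 := fun e => m14 (e ▸ hw)
      have n13 : w ≠ 13 := fun e => m13 (e ▸ hw)
      have n12 : w ≠ 12 := fun e => m12 (e ▸ hw)
      have n11 : w ≠ 11 := fun e => m11 (e ▸ hw)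
      have n10 : w ≠ 10 := fun e => m10 (e ▸ hw)
      have n9 : w ≠ 9 := fun e => m9 (e ▸ hw)
      have n8 : w ≠ 8 := fun e => m8 (e ▸ hw)
      have n7 : w ≠ 7 := fun e => m7 (e ▸ hw)
      have n6 : w ≠ 6 := fun e => m6 (e ▸ hw)
      omega
    have hcon : ranks.contains "5" = true := by
      simpa using (mem_vals_iff ranks "5" 5 rfl (inj5)).mp m5
    rw [cascade, hmax]
    rw [if_neg (by simp only [hcn14]; exact Bool.false_ne_true), if_neg (by simp only [hcn13]; exact Bool.false_ne_true), if_neg (by simp only [hcn12]; exact Bool.false_ne_true), if_neg (by simp only [hcn11]; exact Bool.false_ne_true), if_neg (by simp only [hcn10]; exact Bool.false_ne_true), if_neg (by simp only [hcn9]; exact Bool.false_ne_true), if_neg (by simp only [hcn8]; exact Bool.false_ne_true), if_neg (by simp only [hcn7]; exact Bool.false_ne_true), if_neg (by simp only [hcn6]; exact Bool.false_ne_true), if_pos hcon]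
    rfl
  have hcn5 : ranks.contains "5" = false := by
    by_contra hc
    exact m5 ((mem_vals_iff ranks "5" 5 rfl (inj5)).mpr (by simpa using Bool.of_not_eq_false hc))
  by_cases m4 : (4 : Int) ∈ vals ranks
  · have hmax : (vals ranks).max? = some 4 := by
      apply max?_eq_some_of_mem_of_le _ _ m4
      intro w hw
      have hb := hbnd w hw
      have n14 : w ≠ 14 := fun e => m14 (e ▸ hw)
      have n13 : w ≠ 13 := fun e => m13 (e ▸ hw)
      have n12 : w ≠ 12 := fun e => m12 (e ▸ hw)
      have n11 : w ≠ 11 := fun e => m11 (e ▸ hw)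
      have n10 : w ≠ 10 := fun e => m10 (e ▸ hw)
      have n9 : w ≠ 9 := fun e => m9 (e ▸ hw)
      have n8 : w ≠ 8 := fun e => m8 (e ▸ hw)
      have n7 : w ≠ 7 := fun e => m7 (e ▸ hw)
      have n6 : w ≠ 6 := fun e => m6 (e ▸ hw)
      have n5 : w ≠ 5 := fun e => m5 (e ▸ hw)
      omega
    have hcon : ranks.contains "4" = true := by
      simpa using (mem_vals_iff ranks "4" 4 rfl (inj4)).mp m4
    rw [cascade, hmax]
    rw [if_neg (by simp only [hcn14]; exact Bool.false_ne_true), if_neg (by simp only [hcn13]; exact Bool.false_ne_true), if_neg (by simp only [hcn12]; exact Bool.false_ne_true), if_neg (by simp only [hcn11]; exact Bool.false_ne_true), if_neg (by simp only [hcn10]; exact Bool.false_ne_true), if_neg (by simp only [hcn9]; exact Bool.false_ne_true), if_neg (by simp only [hcn8]; exact Bool.false_ne_true), if_neg (by simp only [hcn7]; exact Bool.false_ne_true), if_neg (by simp only [hcn6]; exact Bool.false_ne_true), if_neg (by simp only [hcn5]; exact Bool.false_ne_true), if_pos hcon]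
    rfl
  have hcn4 : ranks.contains "4" = false := by
    by_contra hc
    exact m4 ((mem_vals_iff ranks "4" 4 rfl (inj4)).mpr (by simpa using Bool.of_not_eq_false hc))
  by_cases m3 : (3 : Int) ∈ vals ranks
  · have hmax : (vals ranks).max? = some 3 := by
      apply max?_eq_some_of_mem_of_le _ _ m3
      intro w hw
      have hb := hbnd w hw
      have n14 : w ≠ 14 := fun e => m14 (e ▸ hw)
      have n13 : w ≠ 13 := fun e => m13 (e ▸ hw)
      have n12 : w ≠ 12 := fun e => m12 (e ▸ hw)
      have n11 : w ≠ 11 := fun e => m11 (e ▸ hw)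
      have n10 : w ≠ 10 := fun e => m10 (e ▸ hw)
      have n9 : w ≠ 9 := fun e => m9 (e ▸ hw)
      have n8 : w ≠ 8 := fun e => m8 (e ▸ hw)
      have n7 : w ≠ 7 := fun e => m7 (e ▸ hw)
      have n6 : w ≠ 6 := fun e => m6 (e ▸ hw)
      have n5 : w ≠ 5 := fun e => m5 (e ▸ hw)
      have n4 : w ≠ 4 := fun e => m4 (e ▸ hw)
      omega
    have hcon : ranks.contains "3" = true := by
      simpa using (mem_vals_iff ranks "3" 3 rfl (inj3)).mp m3
    rw [cascade, hmax]
    rw [if_neg (by simp only [hcn14]; exact Bool.false_ne_true), if_neg (by simp only [hcn13]; exact Bool.false_ne_true), if_neg (by simp only [hcn12]; exact Bool.false_ne_true), if_neg (by simp only [hcn11]; exact Bool.false_ne_true), if_neg (by simp only [hcn10]; exact Bool.false_ne_true), if_neg (by simp only [hcn9]; exact Bool.false_ne_true), if_neg (by simp only [hcn8]; exact Bool.false_ne_true), if_neg (by simp only [hcn7]; exact Bool.false_ne_true), if_neg (by simp only [hcn6]; exact Bool.false_ne_true), if_neg (by simp only [hcn5]; exact Bool.false_ne_true), if_neg (by simp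 only [hcn4]; exact Bool.false_ne_true), if_pos hcon]
    rfl
  have hcn3 : ranks.contains "3" = false := by
    by_contra hc
    exact m3 ((mem_vals_iff ranks "3" 3 rfl (inj3)).mpr (by simpa using Bool.of_not_eq_false hc))
  by_cases m2 : (2 : Int) ∈ vals ranks
  · have hmax : (vals ranks).max? = some 2 := by
      apply max?_eq_some_of_mem_of_le _ _ m2
      intro w hw
      have hb := hbnd w hw
      have n14 : w ≠ 14 := fun e => m14 (e ▸ hw)
      have n13 : w ≠ 13 := fun e => m13 (e ▸ hw)
      have n12 : w ≠ 12 := fun e => m12 (e ▸ hw)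
      have n11 : w ≠ 11 := fun e => m11 (e ▸ hw)
      have n10 : w ≠ 10 := fun e => m10 (e ▸ hw)
      have n9 : w ≠ 9 := fun e => m9 (e ▸ hw)
      have n8 : w ≠ 8 := fun e => m8 (e ▸ hw)
      have n7 : w ≠ 7 := fun e => m7 (e ▸ hw)
      have n6 : w ≠ 6 := fun e => m6 (e ▸ hw)
      have n5 : w ≠ 5 := fun e => m5 (e ▸ hw)
      have n4 : w ≠ 4 := fun e => m4 (e ▸ hw)
      have n3 : w ≠ 3 := fun e => m3 (e ▸ hw)
      omega
    have hcon : ranks.contains "2" = true := by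
      simpa using (mem_vals_iff ranks "2" 2 rfl (inj2)).mp m2
    rw [cascade, hmax]
    rw [if_neg (by simp only [hcn14]; exact Bool.false_ne_true), if_neg (by simp only [hcn13]; exact Bool.false_ne_true), if_neg (by simp only [hcn12]; exact Bool.false_ne_true), if_neg (by simp only [hcn11]; exact Bool.false_ne_true), if_neg (by simp only [hcn10]; exact Bool.false_ne_true), if_neg (by simp only [hcn9]; exact Bool.false_ne_true), if_neg (by simp only [hcn8]; exact Bool.false_ne_true), if_neg (by simp only [hcn7]; exact Bool.false_ne_true), if_neg (by simp only [hcn6]; exact Bool.false_ne_true), if_neg (by simp only [hcn5]; exact Bool.false_ne_true), if_neg (by simp only [hcn4]; exact Bool.false_ne_true), if_neg (by simp only [hcn3]; exact Bool.false_ne_true), if_pos hcon]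
    rfl
  have hcn2 : ranks.contains "2" = false := by
    by_contra hc
    exact m2 ((mem_vals_iff ranks "2" 2 rfl (inj2)).mpr (by simpa using Bool.of_not_eq_false hc))
  have hnil : vals ranks = [] := by
    cases hv : vals ranks with
    | nil => rfl
    | cons a t =>
      exfalso
      have ha : a ∈ vals ranks := by rw [hv]; exact List.mem_cons_self ..
      have hb := vals_bound ranks a ha
      have : a ≠ 14 := fun e => m14 (e ▸ (hv ▸ ha))
      have : a ≠ 13 := fun e => m13 (e ▸ (hv ▸ ha))
      have : a ≠ 12 := fun e => m12 (e ▸ (hv ▸ ha))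
      have : a ≠ 11 := fun e => m11 (e ▸ (hv ▸ ha))
      have : a ≠ 10 := fun e => m10 (e ▸ (hv ▸ ha))
      have : a ≠ 9 := fun e => m9 (e ▸ (hv ▸ ha))
      have : a ≠ 8 := fun e => m8 (e ▸ (hv ▸ ha))
      have : a ≠ 7 := fun e => m7 (e ▸ (hv ▸ ha))
      have : a ≠ 6 := fun e => m6 (e ▸ (hv ▸ ha))
      have : a ≠ 5 := fun e => m5 (e ▸ (hv ▸ ha))
      have : a ≠ 4 := fun e => m4 (e ▸ (hv ▸ ha))
      have : a ≠ 3 := fun e => m3 (e ▸ (hv ▸ ha))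
      have : a ≠ 2 := fun e => m2 (e ▸ (hv ▸ ha))
      omega
  rw [cascade]
  rw [if_neg (by simp only [hcn14]; exact Bool.false_ne_true), if_neg (by simp only [hcn13]; exact Bool.false_ne_true), if_neg (by simp only [hcn12]; exact Bool.false_ne_true), if_neg (by simp only [hcn11]; exact Bool.false_ne_true), if_neg (by simp only [hcn10]; exact Bool.false_ne_true), if_neg (by simp only [hcn9]; exact Bool.false_ne_true), if_neg (by simp only [hcn8]; exact Bool.false_ne_true), if_neg (by simp only [hcn7]; exact Bool.false_ne_true), if_neg (by simp only [hcn6]; exact Bool.false_ne_true), if_neg (by simp only [hcn5]; exact Bool.false_ne_true), if_neg (by simp only [hcn4]; exact Bool.false_ne_true), if_neg (by simp only [hcn3]; exact Bool.false_ne_true), if_neg (by simp only [hcn2]; exact Bool.false_ne_true)]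
  rw [hnil]
  rfl

-- ===== VERDICT (by name: the statement is the Claim_ definition above) =====
theorem get_high_card_spec : Claim_equal_get_high_card := by
  intro cards _
  unfold Spec_get_high_card
  rw [A_eq, B_eq, cascade_eq]
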